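-- pv_equiv track=rewrite | github.com/LuizNicolao/terceirize_foods | foods/teste_cardapio/app.py | collapse_duplicate_headers
-- ===== SOURCE A (Python) =====
-- from collections import defaultdict
--
-- def collapse_duplicate_headers(headers, body):
--     idx_by_header = defaultdict(list)
--     for j, h in enumerate(headers):
--         idx_by_header[h].append(j)
--     unique_headers = list(idx_by_header.keys())
--     new_body = []
--     for r in body:
--         new_row = []
--         for h in unique_headers:
--             idxs = idx_by_header[h]
--             parts = []
--             for j in idxs:
--                 if j < len(r) and r[j]:
--                     parts.append(r[j])
--             new_row.append(" ".join(parts).strip())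
--         new_body.append(new_row)
--     return unique_headers, new_body
-- ===== SOURCE B (Python) =====
-- from collections import defaultdict
--
-- def collapse_duplicate_headers(headers, body):
--     unique_headers = list(dict.fromkeys(headers))
--     new_body = []
--     for r in body:
--         groups = defaultdict(list)
--         for h, cell in zip(headers, r):
--             if cell:
--                 groups[h].append(cell)
--         new_body.append([" ".join(groups[h]).strip() for h in unique_headers])
--     return unique_headers, new_body
-- ===== Notes on version B (the rewrite author's own statement) =====
-- stated objective: simpler
-- what changed: Replaces the precomputed header->positions index and per-row indexed gathering with an on-the-fly zip-and-group pass per row (dict.fromkeys for unique headers, a fresh defaultdict per row, a comprehension for the new row).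
import Mathlib
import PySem

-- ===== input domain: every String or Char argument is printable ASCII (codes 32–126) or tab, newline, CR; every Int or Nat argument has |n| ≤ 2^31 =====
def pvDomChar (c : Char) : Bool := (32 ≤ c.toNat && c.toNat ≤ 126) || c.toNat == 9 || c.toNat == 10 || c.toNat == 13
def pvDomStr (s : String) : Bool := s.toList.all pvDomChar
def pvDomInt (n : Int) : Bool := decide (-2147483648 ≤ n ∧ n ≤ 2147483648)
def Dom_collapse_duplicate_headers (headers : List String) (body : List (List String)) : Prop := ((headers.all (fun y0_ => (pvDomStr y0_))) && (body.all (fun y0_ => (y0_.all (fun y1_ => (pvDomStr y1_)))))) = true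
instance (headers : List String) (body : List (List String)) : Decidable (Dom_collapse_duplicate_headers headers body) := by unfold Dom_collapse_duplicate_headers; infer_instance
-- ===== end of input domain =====

-- B merges duplicate-header columns by zip-and-group per row instead of A's precomputed position index: same values, simpler decomposition.

-- ===== PORT A =====
-- literal transliteration of A: build idx_by_header over enumerate(headers), then gather per row by stored positions
def collapse_duplicate_headers (headers : List String) (body : List (List String)) : List String × List (List String) :=
  let idx_by_header : PySem.Dict String (List Int) :=
    (PySem.List.enumerate headers 0).foldl (fun d p => d.modify p.2 [] (· ++ [p.1])) PySem.Dict.empty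
  let unique_headers := idx_by_header.keys
  let new_body := body.foldl (fun nb r =>
    let new_row := unique_headers.foldl (fun row h =>
      let idxs := idx_by_header.getD h []
      let parts := idxs.foldl (fun parts j =>
        if j < (r.length : Int) ∧ PySem.List.pyGetD r j "" ≠ "" then parts ++ [PySem.List.pyGetD r j ""] else parts) []
      row ++ [PySem.Str.strip (PySem.Str.join " " parts)]) []
    nb ++ [new_row]) []
  (unique_headers, new_body)

-- ===== PORT B =====
-- literal transliteration of Source B: dict.fromkeys for unique headers, per-row zip-and-group into a fresh dict
def collapse_duplicate_headers_alt (headers : List String) (body : List (List String)) : List String × List (List String) :=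
  let unique_headers := PySem.List.dedup headers
  let new_body := body.map (fun r =>
    let groups : PySem.Dict String (List String) :=
      (headers.zip r).foldl (fun d p => if p.2 ≠ "" then d.modify p.1 [] (· ++ [p.2]) else d) PySem.Dict.empty
    unique_headers.map (fun h => PySem.Str.strip (PySem.Str.join " " (groups.getD h []))))
  (unique_headers, new_body)

-- ===== PRECONDITION & SPEC =====
def Spec_collapse_duplicate_headers (headers : List String) (body : List (List String)) (out : List String × List (List String)) : Prop := out = collapse_duplicate_headers_alt headers body
instance (headers : List String) (body : List (List String)) (out : List String × List (List String)) : Decidable (Spec_collapse_duplicate_headers headers body out) := by unfold Spec_collapse_duplicate_headers; infer_instance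

-- ===== CLAIM (what is proved, stated in full; the proofs are below) =====
def Claim_equal_collapse_duplicate_headers : Prop := ∀ (headers : List String) (body : List (List String)), Dom_collapse_duplicate_headers headers body → Spec_collapse_duplicate_headers headers body (collapse_duplicate_headers headers body)

-- ===== LEMMAS AND PROOFS =====

-- filter/map ("gather") form of A's guarded inner loop over a list of positions
def pvGather (r : List String) (idxs : List Int) : List String :=
  (idxs.filter (fun j => decide (j < (r.length : Int) ∧ PySem.List.pyGetD r j "" ≠ ""))).map
    (fun j => PySem.List.pyGetD r j "")

theorem pvFoldAppendIf (r : List String) (idxs : List Int) (init : List String) :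
    idxs.foldl (fun parts j =>
        if j < (r.length : Int) ∧ PySem.List.pyGetD r j "" ≠ "" then parts ++ [PySem.List.pyGetD r j ""] else parts) init
      = init ++ pvGather r idxs := by
  induction idxs generalizing init with
  | nil => simp [pvGather]
  | cons j idxs ih =>
    simp only [List.foldl_cons, pvGather, List.filter_cons]
    by_cases h : j < (r.length : Int) ∧ PySem.List.pyGetD r j "" ≠ ""
    · simp [h, ih, pvGather]
    · simp [h, ih, pvGather]

theorem pvGather_append (r : List String) (l1 l2 : List Int) :
    pvGather r (l1 ++ l2) = pvGather r l1 ++ pvGather r l2 := by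
  simp [pvGather]

theorem pvGather_nil (idxs : List Int) (hnn : ∀ j ∈ idxs, 0 ≤ j) :
    pvGather ([] : List String) idxs = [] := by
  unfold pvGather
  rw [List.filter_eq_nil_iff.mpr, List.map_nil]
  intro j hj
  have := hnn j hj
  simp only [List.length_nil, Nat.cast_zero, decide_eq_true_eq, not_and]
  intro h1
  omega

theorem pvGather_shift (c : String) (rs : List String) (idxs : List Int) (hnn : ∀ j ∈ idxs, 0 ≤ j) :
    pvGather (c :: rs) (idxs.map (· + 1)) = pvGather rs idxs := by
  induction idxs with
  | nil => simp [pvGather]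
  | cons j idxs ih =>
    have hj : 0 ≤ j := hnn j (by simp)
    have hget : PySem.List.pyGetD (c :: rs) (j + 1) "" = PySem.List.pyGetD rs j "" := by
      lift j to ℕ using hj
      have h1 : ((j : Int) + 1) = ((j + 1 : ℕ) : Int) := by push_cast; ring
      rw [h1, PySem.List.pyGetD_natCast, PySem.List.pyGetD_natCast]
      simp
    have hih := ih (fun x hx => hnn x (List.mem_cons_of_mem _ hx))
    have hiff : (j + 1 < ((c :: rs).length : Int) ∧ PySem.List.pyGetD (c :: rs) (j + 1) "" ≠ "")
        ↔ (j < (rs.length : Int) ∧ PySem.List.pyGetD rs j "" ≠ "") := by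
      rw [hget]
      simp only [List.length_cons]
      constructor <;> rintro ⟨h1, h2⟩ <;> exact ⟨by push_cast at h1 ⊢; omega, h2⟩
    simp only [pvGather, List.map_cons, List.filter_cons] at hih ⊢
    by_cases h : j < (rs.length : Int) ∧ PySem.List.pyGetD rs j "" ≠ ""
    · rw [if_pos (by simp only [decide_eq_true_eq]; exact hiff.mpr h),
          if_pos (by simp only [decide_eq_true_eq]; exact h)]
      simp only [List.map_cons, hget]
      exact congrArg _ hih
    · rw [if_neg (by simp only [decide_eq_true_eq]; exact fun hx => h (hiff.mp hx)),
          if_neg (by simp only [decide_eq_true_eq]; exact h)]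
      exact hih

theorem pvEnum_nonneg (hs : List String) (j : Int) (h : String)
    (hmem : j ∈ ((PySem.List.enumerate hs 0).filter (fun p => p.2 == h)).map (·.1)) : 0 ≤ j := by
  simp only [List.mem_map, List.mem_filter] at hmem
  obtain ⟨p, ⟨hp, _⟩, rfl⟩ := hmem
  rw [PySem.List.mem_enumerate_iff] at hp
  obtain ⟨k, hk, rfl⟩ := hp
  simp

theorem pvEnumShift (xs : List String) (s : Int) :
    PySem.List.enumerate xs (s + 1) = (PySem.List.enumerate xs s).map (fun p => (p.1 + 1, p.2)) := by
  induction xs generalizing s with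
  | nil => simp [PySem.List.enumerate_nil]
  | cons x xs ihx => rw [PySem.List.enumerate_cons, PySem.List.enumerate_cons, List.map_cons, ihx]

theorem pvCentral (hs : List String) (r : List String) (h : String) :
    pvGather r (((PySem.List.enumerate hs 0).filter (fun p => p.2 == h)).map (·.1))
      = ((hs.zip r).filter (fun p => p.1 == h && p.2 != "")).map (·.2) := by
  induction hs generalizing r with
  | nil => simp [pvGather, PySem.List.enumerate_nil]
  | cons a hs ih =>
    cases r with
    | nil =>
      rw [pvGather_nil _ (fun j hj => pvEnum_nonneg (a :: hs) j h hj)]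
      simp
    | cons c rs =>
      have hE : ((PySem.List.enumerate (a :: hs) 0).filter (fun p => p.2 == h)).map (·.1)
          = (if a == h then [(0 : Int)] else [])
            ++ ((((PySem.List.enumerate hs 0).filter (fun p => p.2 == h)).map (·.1)).map (· + 1)) := by
        rw [PySem.List.enumerate_cons, show (0 : Int) + 1 = 0 + 1 from rfl, pvEnumShift hs 0]
        by_cases ha : (a == h) = true <;>
          simp [ha, List.filter_map, List.map_map, Function.comp_def]
      rw [hE, pvGather_append,
          pvGather_shift c rs _ (fun j hj => pvEnum_nonneg hs j h hj), ih rs]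
      simp only [List.zip_cons_cons, List.filter_cons]
      by_cases ha : (a == h) = true
      · rw [if_pos ha]
        by_cases hc : c = ""
        · subst hc
          simp [pvGather, ha, PySem.List.pyGetD_zero_cons]
        · have hsing : pvGather (c :: rs) [(0 : Int)] = [c] := by
            simp only [pvGather, List.filter_cons, List.filter_nil]
            rw [if_pos]
            · simp [PySem.List.pyGetD_zero_cons]
            · simp only [decide_eq_true_eq]
              exact ⟨by push_cast [List.length_cons]; omega,
                by rw [PySem.List.pyGetD_zero_cons]; exact hc⟩
          rw [hsing]
          simp [ha, hc]
      · simp [ha, pvGather]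

theorem pvGroupFilter (l : List (String × String)) (d : PySem.Dict String (List String)) :
    l.foldl (fun d p => if p.2 ≠ "" then d.modify p.1 [] (· ++ [p.2]) else d) d
      = (l.filter (fun p => p.2 != "")).foldl (fun d p => d.modify p.1 [] (· ++ [p.2])) d := by
  induction l generalizing d with
  | nil => simp
  | cons p l ihl =>
    by_cases h : p.2 = ""
    · rw [List.foldl_cons, if_neg (by simp [h]), List.filter_cons, if_neg (by simp [h])]
      exact ihl d
    · rw [List.foldl_cons, if_pos h, List.filter_cons, if_pos (by simp [h]), List.foldl_cons]
      exact ihl _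

-- B's per-row group for header h, as a filter/map over the zip
theorem pvGroupGetD (headers r : List String) (h : String) :
    ((headers.zip r).foldl (fun d p => if p.2 ≠ "" then d.modify p.1 [] (· ++ [p.2]) else d)
        PySem.Dict.empty).getD h []
      = ((headers.zip r).filter (fun p => p.1 == h && p.2 != "")).map (·.2) := by
  rw [pvGroupFilter, PySem.Dict.getD_foldl_modify_append]
  simp [List.filter_filter, Bool.and_comm]

-- A's index dict: getD is the positions of h, keys are the distinct headers in order
theorem pvIdxGetD (headers : List String) (h : String) :
    ((PySem.List.enumerate headers 0).foldl (fun d p => d.modify p.2 [] (· ++ [p.1]))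
        PySem.Dict.empty).getD h []
      = ((PySem.List.enumerate headers 0).filter (fun p => p.2 == h)).map (·.1) := by
  have hswap : (PySem.List.enumerate headers 0).foldl (fun d p => d.modify p.2 [] (· ++ [p.1])) PySem.Dict.empty
      = ((PySem.List.enumerate headers 0).map Prod.swap).foldl
          (fun d p => d.modify p.1 [] (· ++ [p.2])) PySem.Dict.empty := by
    rw [List.foldl_map]
    simp [Prod.fst_swap, Prod.snd_swap]
  rw [hswap, PySem.Dict.getD_foldl_modify_append]
  simp [List.filter_map, List.map_map, Function.comp_def, Prod.swap]

theorem pvIdxKeys (headers : List String) :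
    ((PySem.List.enumerate headers 0).foldl (fun d p => d.modify p.2 [] (· ++ [p.1]))
        PySem.Dict.empty).keys = PySem.List.dedup headers := by
  rw [PySem.Dict.keys_foldl_modify_key (PySem.List.enumerate headers 0) (fun p => p.2) []
        (fun _ p => (· ++ [p.1])) PySem.Dict.empty]
  simp [PySem.List.map_snd_enumerate, PySem.Set.update_nil_left]

-- ===== VERDICT (by name: the statement is the Claim_ definition above) =====
theorem collapse_duplicate_headers_spec : Claim_equal_collapse_duplicate_headers := by
  intro headers body _
  unfold Spec_collapse_duplicate_headers collapse_duplicate_headers collapse_duplicate_headers_alt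
  simp only
  refine Prod.ext ?_ ?_
  · simp [pvIdxKeys]
  · simp only
    rw [PySem.List.foldl_append_singleton_eq_map]
    refine List.map_congr_left ?_
    intro r _
    rw [PySem.List.foldl_append_singleton_eq_map, pvIdxKeys]
    refine List.map_congr_left ?_
    intro h _
    rw [pvFoldAppendIf, List.nil_append, pvIdxGetD, pvCentral, pvGroupGetD]
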